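-- pv_equiv track=rewrite | github.com/jainam-shah-18/LuxeEstate | properties/views.py | _parse_nearby_input
-- ===== SOURCE A (Python) =====
-- def _parse_nearby_input(raw_value):
--     if not raw_value:
--         return []
--
--     normalized = str(raw_value).replace('\r\n', '\n').replace('\r', '\n')
--     items = []
--     for line in normalized.split('\n'):
--         for part in line.split(','):
--             value = part.strip()
--             if value:
--                 items.append(value)
--     return items
-- ===== SOURCE B (Python) =====
-- def _parse_nearby_input(raw_value):
--     # One-pass scan: flush the current token at every ',' / '\r' / '\n'.
--     items = []
--     cur = []
--     for ch in str(raw_value):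
--         if ch in ',\r\n':
--             tok = ''.join(cur).strip()
--             if tok:
--                 items.append(tok)
--             cur = []
--         else:
--             cur.append(ch)
--     tok = ''.join(cur).strip()
--     if tok:
--         items.append(tok)
--     return items
-- ===== Notes on version B (the rewrite author's own statement) =====
-- stated objective: alternative
-- what changed: Replaces the two whole-string replace() normalization passes plus nested line/comma split loops by a single character-by-character scan that flushes the current token at each separator character (comma, carriage return, newline).
import Mathlib
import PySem

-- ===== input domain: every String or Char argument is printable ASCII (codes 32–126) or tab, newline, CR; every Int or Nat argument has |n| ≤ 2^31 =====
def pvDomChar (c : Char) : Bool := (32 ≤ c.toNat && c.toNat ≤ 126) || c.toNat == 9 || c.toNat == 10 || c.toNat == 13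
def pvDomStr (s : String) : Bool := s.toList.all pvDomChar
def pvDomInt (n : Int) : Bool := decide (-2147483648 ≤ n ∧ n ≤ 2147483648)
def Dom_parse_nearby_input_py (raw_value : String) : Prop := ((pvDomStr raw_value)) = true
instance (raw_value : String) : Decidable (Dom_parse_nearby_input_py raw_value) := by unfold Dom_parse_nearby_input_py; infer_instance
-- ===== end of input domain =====

-- B replaces A's two replace() passes plus nested line/comma split loops by one char-by-char scan
-- that flushes the current token at each ',', '\r' or '\n' (alternative decomposition; same result).

-- ===== PORT A =====
def parse_nearby_input_py (raw_value : String) : List String :=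
  if raw_value = "" then []
  else
    let normalized :=
      PySem.Chars.replace (PySem.Chars.replace raw_value.toList ['\r', '\n'] ['\n']) ['\r'] ['\n']
    (PySem.Chars.splitOn normalized ['\n']).foldl (fun items line =>
      (PySem.Chars.splitOn line [',']).foldl (fun items part =>
        let value := PySem.Chars.strip part
        if value = [] then items else items ++ [String.ofList value]) items) []

-- ===== PORT B =====
-- flush: ''.join(cur).strip(); append if non-empty
def pvFlush (cur : List Char) : List String :=
  let tok := PySem.Chars.strip cur
  if tok = [] then [] else [String.ofList tok]

-- the single for-loop of Source B (isSep is the membership test `ch in ',\r\n'`)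
def pvTokGo (isSep : Char → Bool) : List Char → List String → List Char → List String
  | [], items, cur => items ++ pvFlush cur
  | c :: t, items, cur =>
      if isSep c then pvTokGo isSep t (items ++ pvFlush cur) []
      else pvTokGo isSep t items (cur ++ [c])

def parse_nearby_input_py_alt (raw_value : String) : List String :=
  pvTokGo (fun c => c == ',' || c == '\r' || c == '\n') raw_value.toList [] []

-- ===== PRECONDITION & SPEC =====
def Spec_parse_nearby_input_py (raw_value : String) (out : List String) : Prop := out = parse_nearby_input_py_alt raw_value
instance (raw_value : String) (out : List String) : Decidable (Spec_parse_nearby_input_py raw_value out) := by unfold Spec_parse_nearby_input_py; infer_instance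

-- ===== CLAIM (what is proved, stated in full; the proofs are below) =====
def Claim_equal_parse_nearby_input_py : Prop := ∀ (raw_value : String), Dom_parse_nearby_input_py raw_value → Spec_parse_nearby_input_py raw_value (parse_nearby_input_py raw_value)

-- ===== LEMMAS AND PROOFS =====

-- A's first replace: every "\r\n" becomes "\n" (structural form)
def pvCrlf : List Char → List Char
  | [] => []
  | '\r' :: '\n' :: t => '\n' :: pvCrlf t
  | c :: t => c :: pvCrlf t

-- A's second replace: map '\r' to '\n'
def pvMapCR (c : Char) : Char := if c == '\r' then '\n' else c

lemma pv_flush_nil : pvFlush [] = [] := by decide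

lemma pv_go_splitOn_single (c : Char) :
    ∀ (l : List Char) (fuel : Nat) (cur : List Char) (acc : List (List Char)), l.length ≤ fuel →
      PySem.Chars.splitOn.go [c] fuel l cur acc
        = acc.reverse ++ (List.splitOnP (· == c) l).modifyHead (cur.reverse ++ ·) := by
  intro l
  induction l with
  | nil =>
    intro fuel cur acc _
    cases fuel <;> simp [PySem.Chars.splitOn.go, List.splitOnP_nil]
  | cons x rest ih =>
    intro fuel cur acc hf
    cases fuel with
    | zero => simp at hf
    | succ f =>
      simp only [PySem.Chars.splitOn.go]
      by_cases hx : x = c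
      · subst hx
        have hpre : [x].isPrefixOf (x :: rest) = true := by simp [List.isPrefixOf]
        rw [if_pos hpre]
        have := ih f [] (cur.reverse :: acc) (Nat.le_of_succ_le_succ hf)
        simp only [List.length_cons, List.drop_succ_cons, List.length_nil, List.drop_zero] at this ⊢
        rw [this]
        simp only [List.splitOnP_cons]
        cases h2 : List.splitOnP (fun y => y == x) rest <;> simp [List.modifyHead]
      · have hpre : [c].isPrefixOf (x :: rest) = false := by
          simp [List.isPrefixOf]
          exact fun h => absurd h.symm hx
        rw [if_neg (by simp [hpre])]
        rw [ih f (x :: cur) acc (Nat.le_of_succ_le_succ hf)]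
        have hne := List.splitOnP_ne_nil (· == c) rest
        cases hsp : List.splitOnP (· == c) rest with
        | nil => exact absurd hsp hne
        | cons h t =>
          simp [List.splitOnP_cons, hx, List.modifyHead, hsp]

lemma pv_splitOn_single (s : List Char) (c : Char) :
    PySem.Chars.splitOn s [c] = List.splitOnP (· == c) s := by
  unfold PySem.Chars.splitOn
  rw [pv_go_splitOn_single c s (s.length + 1) [] [] (Nat.le_succ _)]
  cases h2 : List.splitOnP (· == c) s <;> simp [List.modifyHead]

lemma pv_go_replace_single (a b : Char) :
    ∀ (l : List Char) (fuel : Nat) (acc : List Char), l.length ≤ fuel →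
      PySem.Chars.replace.go [a] [b] fuel l acc
        = acc.reverse ++ l.map (fun c => if c == a then b else c) := by
  intro l
  induction l with
  | nil => intro fuel acc _; cases fuel <;> simp [PySem.Chars.replace.go]
  | cons x rest ih =>
    intro fuel acc hf
    cases fuel with
    | zero => simp at hf
    | succ f =>
      simp only [PySem.Chars.replace.go]
      by_cases hx : x = a
      · subst hx
        have hpre : [x].isPrefixOf (x :: rest) = true := by simp [List.isPrefixOf]
        rw [if_pos hpre]
        simp only [List.length_cons, List.length_nil, List.drop_succ_cons, List.drop_zero]
        rw [ih f ([b].reverse ++ acc) (Nat.le_of_succ_le_succ hf)]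
        simp
      · have hpre : [a].isPrefixOf (x :: rest) = false := by
          simp [List.isPrefixOf]
          exact fun h => absurd h.symm hx
        rw [if_neg (by simp [hpre])]
        rw [ih f (x :: acc) (Nat.le_of_succ_le_succ hf)]
        simp [hx]

lemma pv_replace_single (s : List Char) (a b : Char) :
    PySem.Chars.replace s [a] [b] = s.map (fun c => if c == a then b else c) := by
  unfold PySem.Chars.replace
  rw [if_neg (by simp)]
  rw [pv_go_replace_single a b s s.length [] (Nat.le_refl _)]
  simp

lemma pv_go_replace_crlf :
    ∀ (l : List Char) (fuel : Nat) (acc : List Char), l.length ≤ fuel →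
      PySem.Chars.replace.go ['\r', '\n'] ['\n'] fuel l acc = acc.reverse ++ pvCrlf l := by
  intro l
  fun_induction pvCrlf l with
  | case1 =>
    intro fuel acc _; cases fuel <;> simp [PySem.Chars.replace.go]
  | case2 t ih =>
    intro fuel acc hf
    cases fuel with
    | zero => simp at hf
    | succ f =>
      simp only [PySem.Chars.replace.go]
      rw [if_pos (by simp [List.isPrefixOf])]
      simp only [List.length_cons, List.length_nil, List.drop_succ_cons, List.drop_zero]
      rw [ih f (['\n'].reverse ++ acc) (by simp at hf; omega)]
      simp
  | case3 c t h1 ih =>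
    intro fuel acc hf
    cases fuel with
    | zero => simp at hf
    | succ f =>
      simp only [PySem.Chars.replace.go]
      rw [if_neg ?hpre]
      case hpre =>
        intro h
        cases t with
        | nil => simp [List.isPrefixOf] at h
        | cons d t' =>
          simp [List.isPrefixOf] at h
          exact h1 t' h.1.symm (by rw [← h.2])
      rw [ih f (c :: acc) (by simp at hf; omega)]
      simp

lemma pv_replace_crlf (s : List Char) :
    PySem.Chars.replace s ['\r', '\n'] ['\n'] = pvCrlf s := by
  unfold PySem.Chars.replace
  rw [if_neg (by simp)]
  rw [pv_go_replace_crlf s s.length [] (Nat.le_refl _)]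
  simp

lemma pv_tokGo_eq (p : Char → Bool) :
    ∀ (l : List Char) (items : List String) (cur : List Char),
      pvTokGo p l items cur
        = items ++ ((List.splitOnP p l).modifyHead (cur ++ ·)).flatMap pvFlush := by
  intro l
  induction l with
  | nil => intro items cur; simp [pvTokGo, List.splitOnP_nil, List.modifyHead]
  | cons c t ih =>
    intro items cur
    simp only [pvTokGo]
    by_cases hc : p c
    · rw [if_pos hc, ih]
      cases h2 : List.splitOnP p t with
      | nil => exact absurd h2 (List.splitOnP_ne_nil p t)
      | cons hh tt => simp [List.splitOnP_cons, hc, h2, List.modifyHead]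
    · rw [if_neg hc, ih]
      cases h2 : List.splitOnP p t with
      | nil => exact absurd h2 (List.splitOnP_ne_nil p t)
      | cons hh tt => simp [List.splitOnP_cons, hc, h2, List.modifyHead]

lemma pv_splitOnP_flatMap (p q : Char → Bool) (l : List Char) :
    (List.splitOnP p l).flatMap (fun x => List.splitOnP q x)
      = List.splitOnP (fun c => p c || q c) l := by
  induction l with
  | nil => simp [List.splitOnP_nil]
  | cons c t ih =>
    by_cases hp : p c
    · simp [List.splitOnP_cons, hp, ← ih]
    · cases h2 : List.splitOnP p t with
      | nil => exact absurd h2 (List.splitOnP_ne_nil p t)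
      | cons hh tt =>
        by_cases hq : q c
        · simp [List.splitOnP_cons, hp, hq, h2, List.modifyHead, ← ih]
        · simp only [List.splitOnP_cons, hp, hq, Bool.or_self, h2] at ih ⊢
          simp [List.modifyHead, List.splitOnP_cons, hq, ← ih]
          cases h3 : List.splitOnP q hh with
          | nil => exact absurd h3 (List.splitOnP_ne_nil q hh)
          | cons qh qt => simp

lemma pv_inner_foldl (parts : List (List Char)) (items : List String) :
    parts.foldl (fun items part =>
        let value := PySem.Chars.strip part
        if value = [] then items else items ++ [String.ofList value]) items
      = items ++ parts.flatMap pvFlush := by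
  induction parts generalizing items with
  | nil => simp
  | cons p ps ih =>
    simp only [List.foldl_cons, List.flatMap_cons, ih, pvFlush]
    split <;> simp

lemma pv_tokGo_norm :
    ∀ (l : List Char) (items : List String) (cur : List Char),
      pvTokGo (fun c => c == '\n' || c == ',') ((pvCrlf l).map pvMapCR) items cur
        = pvTokGo (fun c => c == ',' || c == '\r' || c == '\n') l items cur := by
  intro l
  fun_induction pvCrlf l with
  | case1 => intro items cur; simp [pvTokGo]
  | case2 t ih =>
    intro items cur
    simp only [List.map_cons, pvMapCR, pvTokGo]
    norm_num
    rw [ih]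
    simp [pv_flush_nil]
  | case3 c t h1 ih =>
    intro items cur
    simp only [List.map_cons, pvTokGo]
    have hpq : (pvMapCR c == '\n' || pvMapCR c == ',') = (c == ',' || c == '\r' || c == '\n') := by
      by_cases hr : c = '\r'
      · subst hr; decide
      · by_cases hn : c = '\n'
        · subst hn; decide
        · by_cases hcm : c = ','
          · subst hcm; decide
          · have e : pvMapCR c = c := by simp [pvMapCR, hr]
            have b1 : (c == '\n') = false := by simp [hn]
            have b2 : (c == ',') = false := by simp [hcm]
            have b3 : (c == '\r') = false := by simp [hr]
            rw [e, b1, b2, b3]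
            simp
    rw [hpq]
    by_cases hp : (c == ',' || c == '\r' || c == '\n') = true
    · rw [if_pos hp, if_pos hp, ih]
    · rw [if_neg hp, if_neg hp]
      have hr : ¬ c = '\r' := by intro h; subst h; exact hp (by decide)
      have e : pvMapCR c = c := by simp [pvMapCR, hr]
      rw [e, ih]

lemma pv_tokGo_eq_nil (p : Char → Bool) (l : List Char) :
    pvTokGo p l [] [] = (List.splitOnP p l).flatMap pvFlush := by
  rw [pv_tokGo_eq]
  cases h2 : List.splitOnP p l <;> simp [List.modifyHead]

-- ===== VERDICT (by name: the statement is the Claim_ definition above) =====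
theorem parse_nearby_input_py_spec : Claim_equal_parse_nearby_input_py := by
  intro s _
  unfold Spec_parse_nearby_input_py parse_nearby_input_py parse_nearby_input_py_alt
  by_cases hs : s = ""
  · subst hs; decide
  · rw [if_neg hs]
    rw [pv_replace_crlf, pv_replace_single]
    have hm : (fun c => if c == '\r' then '\n' else c) = pvMapCR := by
      funext c; simp [pvMapCR]
    rw [hm]
    simp only [pv_splitOn_single, pv_inner_foldl]
    rw [PySem.List.foldl_append_eq_flatMap]
    simp only [List.nil_append]
    rw [← List.flatMap_assoc, pv_splitOnP_flatMap, ← pv_tokGo_eq_nil]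
    exact pv_tokGo_norm s.toList [] []
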